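-- pv_equiv track=rewrite | github.com/Hello-Hoy/anti-deepvoice-guard | model-training/voice-clone/scripts/normalize_korean.py | sino_number
-- ===== SOURCE A (Python) =====
-- SINO_DIGITS = ["영", "일", "이", "삼", "사", "오", "육", "칠", "팔", "구"]
--
-- SINO_UNITS = ["", "십", "백", "천"]
--
-- LARGE_UNITS = ["", "만", "억", "조"]
--
-- def sino_number(num: int) -> str:
--     if num == 0:
--         return "영"
--
--     parts: list[str] = []
--     unit_index = 0
--     while num > 0:
--         chunk = num % 10000
--         if chunk:
--             chunk_text = sino_under_10000(chunk)
--             large = LARGE_UNITS[unit_index]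
--             parts.append(f"{chunk_text}{large}")
--         num //= 10000
--         unit_index += 1
--     return "".join(reversed(parts))
--
-- def sino_under_10000(num: int) -> str:
--     result: list[str] = []
--     digits = list(map(int, f"{num:04d}"))
--     for idx, digit in enumerate(digits):
--         if digit == 0:
--             continue
--         power = 3 - idx
--         if digit == 1 and power > 0:
--             result.append(SINO_UNITS[power])
--         else:
--             result.append(f"{SINO_DIGITS[digit]}{SINO_UNITS[power]}")
--     return "".join(result)
-- ===== SOURCE B (Python) =====
-- SINO_DIGITS = ["영", "일", "이", "삼", "사", "오", "육", "칠", "팔", "구"]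
--
-- SINO_UNITS = ["", "십", "백", "천"]
--
-- LARGE_UNITS = ["", "만", "억", "조"]
--
--
-- def _piece(d: int, p: int, num: int) -> str:
--     """Word emitted for the decimal digit d at absolute position p (0 = ones) of num."""
--     piece = ""
--     if p % 4 == 0 and (num // 10 ** p) % 10000 != 0:
--         piece = LARGE_UNITS[p // 4]
--     if d:
--         if d == 1 and p % 4 > 0:
--             piece = SINO_UNITS[p % 4] + piece
--         else:
--             piece = SINO_DIGITS[d] + SINO_UNITS[p % 4] + piece
--     return piece
--
--
-- def sino_number(num: int) -> str:
--     if num == 0: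
--         return "영"
--     if num < 0:
--         return ""
--     out: list[str] = []
--     n, p = num, 0
--     while n > 0:
--         n, d = divmod(n, 10)
--         out.append(_piece(d, p, num))
--         p += 1
--     return "".join(reversed(out))
-- ===== Notes on version B (the rewrite author's own statement) =====
-- stated objective: simpler
-- what changed: Replaces A's nested structure (a base-10000 chunk loop that formats each chunk to a zero-padded 4-digit string and loops over its digits) with a single divmod-by-10 pass over the decimal digits, emitting one word per digit from its absolute position (unit = position mod 4, large unit at chunk boundaries when the chunk is nonzero).
import Mathlib
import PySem

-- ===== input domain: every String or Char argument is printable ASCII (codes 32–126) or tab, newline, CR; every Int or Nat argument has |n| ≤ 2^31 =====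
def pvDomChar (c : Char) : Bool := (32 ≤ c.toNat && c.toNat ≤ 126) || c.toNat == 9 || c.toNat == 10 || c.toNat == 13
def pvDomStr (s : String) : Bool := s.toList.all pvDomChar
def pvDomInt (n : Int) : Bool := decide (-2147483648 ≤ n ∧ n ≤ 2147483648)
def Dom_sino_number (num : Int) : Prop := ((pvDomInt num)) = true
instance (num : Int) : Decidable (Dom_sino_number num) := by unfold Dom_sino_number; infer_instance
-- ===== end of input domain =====

-- B replaces A's nested chunk-loop/digit-loop with a single pass over the decimal digits
-- (objective: simpler — one loop, one emit rule per digit); same return value, proved below.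

-- ===== PORT A =====
def SINO_DIGITS : List String := ["영", "일", "이", "삼", "사", "오", "육", "칠", "팔", "구"]
def SINO_UNITS : List String := ["", "십", "백", "천"]
def LARGE_UNITS : List String := ["", "만", "억", "조"]

-- f"{num:04d}" for 0 ≤ num < 10000 (the only way A calls this) is exactly the four decimal
-- digits most-significant first; list indexing is exact via getD on the in-range indices used.
def sino_under_10000 (num : Int) : String :=
  let digits : List Int := [(num / 1000) % 10, (num / 100) % 10, (num / 10) % 10, num % 10]
  let result : List String := (PySem.List.enumerate digits).foldl
    (fun acc (pr : Int × Int) =>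
      if pr.2 = 0 then acc
      else
        let power : Int := 3 - pr.1
        if pr.2 = 1 ∧ power > 0 then acc ++ [SINO_UNITS.getD power.toNat ""]
        else acc ++ [(SINO_DIGITS.getD pr.2.toNat "") ++ SINO_UNITS.getD power.toNat ""]) []
  PySem.Str.join "" result

-- the while-loop of A, building `parts` (num //= 10000 is `/` : exact since num > 0 inside the loop)
def sinoLoopA (num : Int) (unit_index : Nat) : List String :=
  if _h : num ≤ 0 then []
  else
    (if num % 10000 ≠ 0 then
        [sino_under_10000 (num % 10000) ++ LARGE_UNITS.getD unit_index ""]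
      else []) ++ sinoLoopA (num / 10000) (unit_index + 1)
termination_by num.toNat
decreasing_by omega

def sino_number (num : Int) : String :=
  if num = 0 then "영"
  else PySem.Str.join "" (sinoLoopA num 0).reverse

-- ===== PORT B =====
-- word emitted for decimal digit d at absolute position p (0 = ones) of num (= Source B's _piece)
def sinoPiece (d : Int) (p : Nat) (num : Int) : String :=
  let piece := if p % 4 = 0 ∧ (num / 10 ^ p) % 10000 ≠ 0 then LARGE_UNITS.getD (p / 4) "" else ""
  if d ≠ 0 then
    if d = 1 ∧ p % 4 > 0 then SINO_UNITS.getD (p % 4) "" ++ piece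
    else (SINO_DIGITS.getD d.toNat "") ++ SINO_UNITS.getD (p % 4) "" ++ piece
  else piece

-- the while-loop of B, building `out` (n //= 10 is `/` : exact since n > 0 inside the loop)
def sinoLoopB (n : Int) (p : Nat) (num : Int) : List String :=
  if _h : n ≤ 0 then []
  else sinoPiece (n % 10) p num :: sinoLoopB (n / 10) (p + 1) num
termination_by n.toNat
decreasing_by omega

def sino_number_alt (num : Int) : String :=
  if num = 0 then "영"
  else if num < 0 then ""
  else PySem.Str.join "" (sinoLoopB num 0 num).reverse

-- ===== PRECONDITION & SPEC =====
def Spec_sino_number (num : Int) (out : String) : Prop := out = sino_number_alt num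
instance (num : Int) (out : String) : Decidable (Spec_sino_number num out) := by unfold Spec_sino_number; infer_instance

-- ===== CLAIM (what is proved, stated in full; the proofs are below) =====
def Claim_equal_sino_number : Prop := ∀ (num : Int), Dom_sino_number num → Spec_sino_number num (sino_number num)

-- ===== LEMMAS AND PROOFS =====

-- character-list views of the joined, reversed part lists of the two loops
def JAL (num : Int) (k : Nat) : List Char :=
  (((sinoLoopA num k).reverse.map String.toList)).flatten
def JBL (n : Int) (p : Nat) (num : Int) : List Char :=
  (((sinoLoopB n p num).reverse.map String.toList)).flatten

-- what A's loop contributes for one base-10000 chunk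
def chunkPart (c : Int) (k : Nat) : List Char :=
  if c ≠ 0 then (sino_under_10000 c).toList ++ (LARGE_UNITS.getD k "").toList else []

theorem join_empty_eq (xs : List String) :
    PySem.Str.join "" xs = String.ofList ((xs.map String.toList)).flatten := by
  have h : ∀ (xss : List (List Char)), PySem.Chars.join [] xss = xss.flatten := by
    intro xss
    induction xss with
    | nil => simp [PySem.Chars.join, List.intercalate]
    | cons x xs ih =>
        simp [PySem.Chars.join, List.intercalate] at *
        cases xs <;> simp_all [List.intersperse]
  simp [PySem.Str.join, h]

theorem JAL_zero (num : Int) (k : Nat) (h : num ≤ 0) : JAL num k = [] := by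
  unfold JAL; rw [sinoLoopA]; simp [h]

theorem JAL_rec (num : Int) (k : Nat) (h : 0 < num) :
    JAL num k = JAL (num / 10000) (k + 1) ++ chunkPart (num % 10000) k := by
  unfold JAL chunkPart; rw [sinoLoopA]
  by_cases hc : num % 10000 = 0 <;> simp [hc, not_le.mpr h]

theorem JBL_zero (n : Int) (p : Nat) (num : Int) (h : n ≤ 0) : JBL n p num = [] := by
  unfold JBL; rw [sinoLoopB]; simp [h]

theorem JBL_rec (n : Int) (p : Nat) (num : Int) (h : 0 < n) :
    JBL n p num = JBL (n / 10) (p + 1) num ++ (sinoPiece (n % 10) p num).toList := by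
  unfold JBL; rw [sinoLoopB]; simp [not_le.mpr h]

-- piece of a zero digit at a position whose whole remaining value is zero is empty
theorem piece_zero (p : Nat) (num : Int) (h : num / 10 ^ p = 0) :
    sinoPiece 0 p num = "" := by
  unfold sinoPiece
  simp [h]

-- the step equation holds even when the loop has stopped, as long as n really is num/10^p
theorem JBL_step (n : Int) (p : Nat) (num : Int) (h0 : 0 ≤ num) (hn : num / 10 ^ p = n) :
    JBL n p num = JBL (n / 10) (p + 1) num ++ (sinoPiece (n % 10) p num).toList := by
  by_cases h : 0 < n
  · exact JBL_rec n p num h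
  · have hz : n = 0 := by
      have := Int.ediv_nonneg h0 (by positivity : (0:Int) ≤ 10 ^ p)
      omega
    subst hz
    rw [JBL_zero _ _ _ (le_refl 0), JBL_zero _ _ _ (by norm_num)]
    simp [piece_zero p num (by simpa using hn)]

theorem div_pow_succ (num : Int) (p : Nat) : num / 10 ^ (p + 1) = (num / 10 ^ p) / 10 := by
  rw [Int.ediv_ediv_of_nonneg (y := (10:Int)^p) (z := 10) (by positivity), ← pow_succ]

theorem div_pow_chunk (num : Int) (k : Nat) :
    num / 10 ^ (4 * (k + 1)) = (num / 10 ^ (4 * k)) / 10000 := by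
  rw [Int.ediv_ediv_of_nonneg (y := (10:Int)^(4*k)) (z := 10000) (by positivity)]
  have h : (10:Int) ^ (4 * (k + 1)) = 10 ^ (4 * k) * 10000 := by rw [mul_add, pow_add]; norm_num
  rw [h]

-- word contributed by one decimal digit d at in-chunk power u (shared shape of both programs)
def digitWord (d : Int) (u : Nat) : List Char :=
  if d = 0 then []
  else if d = 1 ∧ 0 < u then (SINO_UNITS.getD u "").toList
  else (SINO_DIGITS.getD d.toNat "").toList ++ (SINO_UNITS.getD u "").toList

theorem piece_mid (d : Int) (p : Nat) (num : Int) (hm : p % 4 ≠ 0) :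
    (sinoPiece d p num).toList = digitWord d (p % 4) := by
  have hu : 0 < p % 4 := Nat.pos_of_ne_zero hm
  unfold sinoPiece digitWord
  split_ifs <;> simp_all

theorem piece_chunk0 (d : Int) (k : Nat) (num : Int) :
    (sinoPiece d (4 * k) num).toList =
      digitWord d 0 ++
        (if num / 10 ^ (4 * k) % 10000 ≠ 0 then (LARGE_UNITS.getD k "").toList else []) := by
  have m0 : (4 * k) % 4 = 0 := by omega
  have q0 : (4 * k) / 4 = k := by omega
  unfold sinoPiece digitWord
  simp only [m0, q0]
  split_ifs <;> simp_all

theorem under_eq (c : Int) :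
    (sino_under_10000 c).toList =
      digitWord ((c / 1000) % 10) 3 ++
        (digitWord ((c / 100) % 10) 2 ++ (digitWord ((c / 10) % 10) 1 ++ digitWord (c % 10) 0)) := by
  have hfun : (fun (acc : List String) (pr : Int × Int) =>
      if pr.2 = 0 then acc
      else
        if pr.2 = 1 ∧ 3 - pr.1 > 0 then acc ++ [SINO_UNITS.getD (3 - pr.1).toNat ""]
        else acc ++ [(SINO_DIGITS.getD pr.2.toNat "") ++ SINO_UNITS.getD (3 - pr.1).toNat ""])
      = fun acc pr => acc ++ (if pr.2 = 0 then ([] : List String)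
        else if pr.2 = 1 ∧ 3 - pr.1 > 0 then [SINO_UNITS.getD (3 - pr.1).toNat ""]
        else [(SINO_DIGITS.getD pr.2.toNat "") ++ SINO_UNITS.getD (3 - pr.1).toNat ""]) := by
    funext acc pr; split_ifs <;> simp
  simp only [sino_under_10000]
  rw [hfun, PySem.List.foldl_append_eq_flatMap]
  simp only [PySem.List.enumerate_cons, PySem.List.enumerate_nil, List.flatMap_cons,
    List.flatMap_nil, List.append_nil, List.nil_append, join_empty_eq, String.toList_ofList,
    List.map_append, List.flatten_append]
  clear hfun
  congr 1
  · split_ifs <;> simp_all [digitWord]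
  congr 1
  · split_ifs <;> simp_all [digitWord]
  congr 1
  · split_ifs <;> simp_all [digitWord]
  · split_ifs <;> simp_all [digitWord]

-- the four digit-pieces of one chunk joined (most significant first) equal A's chunk part
theorem chunk_text (n : Int) (k : Nat) (num : Int) (hn : num / 10 ^ (4 * k) = n) :
    (sinoPiece ((n / 1000) % 10) (4 * k + 3) num).toList ++
      ((sinoPiece ((n / 100) % 10) (4 * k + 2) num).toList ++
        ((sinoPiece ((n / 10) % 10) (4 * k + 1) num).toList ++
          (sinoPiece (n % 10) (4 * k) num).toList)) = chunkPart (n % 10000) k := by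
  have m1 : (4 * k + 1) % 4 = 1 := by omega
  have m2 : (4 * k + 2) % 4 = 2 := by omega
  have m3 : (4 * k + 3) % 4 = 3 := by omega
  rw [piece_mid _ _ _ (by omega), piece_mid _ _ _ (by omega), piece_mid _ _ _ (by omega),
      piece_chunk0, m1, m2, m3, hn]
  unfold chunkPart
  by_cases hc : n % 10000 = 0
  · have d0 : n % 10 = 0 := by omega
    have d1 : n / 10 % 10 = 0 := by omega
    have d2 : n / 100 % 10 = 0 := by omega
    have d3 : n / 1000 % 10 = 0 := by omega
    simp [hc, d0, d1, d2, d3, digitWord]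
  · have g0 : (n % 10000) % 10 = n % 10 := by omega
    have g1 : (n % 10000) / 10 % 10 = n / 10 % 10 := by omega
    have g2 : (n % 10000) / 100 % 10 = n / 100 % 10 := by omega
    have g3 : (n % 10000) / 1000 % 10 = n / 1000 % 10 := by omega
    simp [hc, under_eq, g0, g1, g2, g3]

-- main loop correspondence: at a chunk boundary the two loops produce the same text
theorem loops_agree (num : Int) (h0 : 0 ≤ num) :
    ∀ (N : Nat) (n : Int), n.toNat ≤ N → ∀ (k : Nat), num / 10 ^ (4 * k) = n →
      JBL n (4 * k) num = JAL n k := by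
  intro N
  induction N with
  | zero =>
      intro n hN k hn
      have hge : 0 ≤ n := hn ▸ Int.ediv_nonneg h0 (by positivity)
      have hz : n = 0 := by omega
      subst hz
      rw [JBL_zero _ _ _ (le_refl 0), JAL_zero _ _ (le_refl 0)]
  | succ N ih =>
      intro n hN k hn
      have hge : 0 ≤ n := hn ▸ Int.ediv_nonneg h0 (by positivity)
      by_cases hpos : 0 < n
      · have h1 : num / 10 ^ (4 * k + 1) = n / 10 := by rw [div_pow_succ, hn]
        have h2 : num / 10 ^ (4 * k + 2) = n / 10 / 10 := by rw [div_pow_succ, h1]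
        have h3 : num / 10 ^ (4 * k + 3) = n / 10 / 10 / 10 := by rw [div_pow_succ, h2]
        have h4 : num / 10 ^ (4 * (k + 1)) = n / 10000 := by rw [div_pow_chunk, hn]
        have e1 : n / 10 / 10 = n / 100 := by omega
        have e2 : n / 10 / 10 / 10 = n / 1000 := by omega
        have e3 : n / 1000 / 10 = n / 10000 := by omega
        rw [JBL_step n (4 * k) num h0 hn,
            JBL_step (n / 10) (4 * k + 1) num h0 h1,
            JBL_step (n / 10 / 10) (4 * k + 2) num h0 (by rw [h2]),
            JBL_step (n / 10 / 10 / 10) (4 * k + 3) num h0 (by rw [h3]),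
            e1, e2] at *
        have h4' : num / 10 ^ (4 * (k + 1)) = n / 10000 := h4
        have hsmall : (n / 10000).toNat ≤ N := by omega
        have hrec := ih (n / 10000) hsmall (k + 1) h4'
        have e4 : 4 * k + 3 + 1 = 4 * (k + 1) := by omega
        rw [e3, e4, hrec, JAL_rec n k hpos]
        rw [List.append_assoc, List.append_assoc, List.append_assoc]
        congr 1
        exact chunk_text n k num hn
      · have hz : n = 0 := by omega
        subst hz
        rw [JBL_zero _ _ _ (le_refl 0), JAL_zero _ _ (le_refl 0)]

-- ===== VERDICT (by name: the statement is the Claim_ definition above) =====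
theorem sino_number_spec : Claim_equal_sino_number := by
  intro num _
  unfold Spec_sino_number sino_number sino_number_alt
  by_cases h0 : num = 0
  · simp [h0]
  · by_cases hneg : num < 0
    · have h1 : ¬ (0:Int) < num := by omega
      rw [sinoLoopA]
      simp [h0, hneg, le_of_lt hneg, PySem.Str.join, PySem.Chars.join, List.intercalate]
    · have hpos : 0 < num := by omega
      have h := loops_agree num (le_of_lt hpos) num.toNat num (le_refl _) 0 (by simp)
      simp only [h0, hneg, if_false]
      rw [join_empty_eq, join_empty_eq]
      unfold JAL JBL at h
      have h40 : 4 * 0 = 0 := rfl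
      rw [h40] at h
      rw [h]
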